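-- pv_equiv track=rewrite | github.com/SirPerpetuum/homework_for_students | 3_functions/1_phone_text_code/decode/decode.py | decode_numbers
-- ===== SOURCE A (Python) =====
-- def decode_numbers(numbers: str) -> str | None:
--     """Декодирует закодированные числа в символы."""
--     numbers = numbers.split()
--     result = []
--
--     # Словарь для ассоциации чисел и декодированных символов
--     mapping = {
--         1: {"0": " ", "1": ".", "2": "а", "3": "д", "4": "и", "5": "м", "6": "р", "7": "ф", "8": "ш", "9": "ь"},
--         2: {"1": ",", "2": "б", "3": "е", "4": "й", "5": "н", "6": "с", "7": "х", "8": "щ", "9": "э"},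
--         3: {"1": "?", "2": "в", "3": "ж", "4": "к", "5": "о", "6": "т", "7": "ц", "8": "ъ", "9": "ю"},
--         4: {"1": "!", "2": "г", "3": "з", "4": "л", "5": "п", "6": "у", "7": "ч", "8": "ы", "9": "я"},
--         5: {str(i): ":" for i in range(10)},  # Для 5-тых у нас только ":"
--         6: {str(i): ";" for i in range(10)},  # Для 6-тых у нас только ";"
--     }
--
--     for number in numbers:
--         if is_correct(number):
--             length = len(number)
--             first_digit = number[0]
--             result.append(mapping[length].get(first_digit, ''))
--         else:
--             return None
--
--     decoded = ''.join(result)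
--     return decoded if decoded else None
--
-- def is_correct(number: str) -> bool:
--     if number[0] == "0":
--         return len(number) == 1
--     elif number[0] == "1":
--         return len(number) <= 6 and all(d == "1" for d in number)
--     else:
--         return len(number) <= 4 and all(d == number[0] for d in number)
-- ===== SOURCE B (Python) =====
-- # Single character-level run-length scan: no split(), no per-token validation pass,
-- # no nested dicts -- one state machine over the raw string; each digit's symbols sit
-- # in one row string indexed by the run length.
-- SYMBOLS = {
--     "0": " ",
--     "1": ".,?!:;",
--     "2": "абвг", "3": "дежз", "4": "ийкл", "5": "мноп",
--     "6": "рсту", "7": "фхцч", "8": "шщъы", "9": "ьэюя",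
-- }
--
--
-- def _symbol(ch, count):
--     row = SYMBOLS.get(ch)
--     if row is None or count > len(row):
--         return None
--     return row[count - 1]
--
--
-- def decode_numbers(numbers: str) -> str | None:
--     """Декодирует закодированные числа в символы."""
--     out = []
--     run_char, run_len = None, 0
--     for ch in numbers:
--         if ch.isspace():
--             if run_len:
--                 sym = _symbol(run_char, run_len)
--                 if sym is None:
--                     return None
--                 out.append(sym)
--                 run_char, run_len = None, 0
--         elif run_len == 0 or ch == run_char:
--             run_char, run_len = ch, run_len + 1
--         else:
--             return None
--     if run_len:
--         sym = _symbol(run_char, run_len)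
--         if sym is None:
--             return None
--         out.append(sym)
--     return "".join(out) if out else None
-- ===== Notes on version B (the rewrite author's own statement) =====
-- stated objective: alternative
-- what changed: Replaces A's split-into-tokens + per-token digit scan + nested (length, first-digit) dict lookup by a single character-level run-length state machine over the raw string that emits each symbol from a per-digit row string indexed by the run length.
-- intended difference: On inputs whose whitespace-separated tokens are all runs of one repeated character of valid length but where some token repeats a non-digit (e.g. 'aa') alongside at least one genuine digit code, A silently decodes the junk token to nothing (an accident of mapping[length].get(first_digit, default)) and returns the remaining symbols, while B returns None because the token is not a valid code, which is the intended rejection of garbage input. — e.g. on decode_numbers("2 aa"): A returns some "а", B returns none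
import Mathlib
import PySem

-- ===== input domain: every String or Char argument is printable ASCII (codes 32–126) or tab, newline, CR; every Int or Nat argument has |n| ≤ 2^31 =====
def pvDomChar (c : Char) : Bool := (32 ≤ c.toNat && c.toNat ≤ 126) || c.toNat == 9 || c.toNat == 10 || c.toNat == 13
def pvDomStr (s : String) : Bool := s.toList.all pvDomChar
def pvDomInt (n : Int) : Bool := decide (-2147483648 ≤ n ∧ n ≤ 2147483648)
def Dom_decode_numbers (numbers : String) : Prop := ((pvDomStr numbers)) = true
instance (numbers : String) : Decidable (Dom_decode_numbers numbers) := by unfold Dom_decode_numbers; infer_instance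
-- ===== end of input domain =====

-- B replaces A's split + per-token scan + nested (length, first-digit) dicts by one
-- character-level run-length state machine over the raw string; on inputs mixing valid
-- digit codes with runs of a repeated non-digit character A silently drops the junk token
-- (D_ below) while B returns none, the intended rejection.


-- ===== PORT A =====
-- is_correct: Python indexes number[0]; on "" that raises IndexError, but decode_numbers
-- only calls it on tokens of numbers.split(), which are nonempty, so the `none` branch is
-- unreachable (ported as false).
def is_correct (number : String) : Bool :=
  match PySem.Str.pyGet? number 0 with
  | none => false
  | some c =>
    if c = '0' then PySem.Str.len number == 1
    else if c = '1' then decide (PySem.Str.len number ≤ 6) && number.toList.all (fun d => d == '1')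
    else decide (PySem.Str.len number ≤ 4) && number.toList.all (fun d => d == c)

def pyMapping : PySem.Dict Int (PySem.Dict String String) :=
  PySem.Dict.ofList [
    (1, PySem.Dict.ofList [("0", " "), ("1", "."), ("2", "а"), ("3", "д"), ("4", "и"),
                           ("5", "м"), ("6", "р"), ("7", "ф"), ("8", "ш"), ("9", "ь")]),
    (2, PySem.Dict.ofList [("1", ","), ("2", "б"), ("3", "е"), ("4", "й"), ("5", "н"),
                           ("6", "с"), ("7", "х"), ("8", "щ"), ("9", "э")]),
    (3, PySem.Dict.ofList [("1", "?"), ("2", "в"), ("3", "ж"), ("4", "к"), ("5", "о"),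
                           ("6", "т"), ("7", "ц"), ("8", "ъ"), ("9", "ю")]),
    (4, PySem.Dict.ofList [("1", "!"), ("2", "г"), ("3", "з"), ("4", "л"), ("5", "п"),
                           ("6", "у"), ("7", "ч"), ("8", "ы"), ("9", "я")]),
    (5, PySem.Dict.ofList ((PySem.List.pyRange 0 10 1).map (fun i => (PySem.Int.toStr i, ":")))),
    (6, PySem.Dict.ofList ((PySem.List.pyRange 0 10 1).map (fun i => (PySem.Int.toStr i, ";"))))]

-- mapping[length].get(first_digit, ''): mapping[length] would be a KeyError for a length
-- outside 1..6, unreachable under is_correct (ported with an empty-dict default);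
-- number[0] is a 1-character string in Python, rebuilt here from the pyGet? Char.
def pvLookupA (number : String) : String :=
  let length := PySem.Str.len number
  let first_digit : String := match PySem.Str.pyGet? number 0 with
    | some c => String.ofList [c]
    | none => ""   -- unreachable: number is a nonempty token
  ((pyMapping.get? length).getD PySem.Dict.empty).getD first_digit ""

def pvLoopA : List String → List String → Option (List String)
  | [], result => some result
  | number :: rest, result =>
    if is_correct number then pvLoopA rest (result ++ [pvLookupA number])
    else none

def decode_numbers (numbers : String) : Option String :=
  match pvLoopA (PySem.Str.split₀ numbers) [] with
  | none => none
  | some result =>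
    let decoded := PySem.Str.join "" result
    -- `decoded if decoded else None`: the empty string is falsy
    if decoded.toList = [] then none else some decoded

-- ===== PORT B =====
-- each digit's symbols sit in one row, indexed by the run length (Python's SYMBOLS dict;
-- Python's 1-character strings are Chars here)
def SYMBOLS : PySem.Dict Char (List Char) :=
  PySem.Dict.ofList [
    ('0', [' ']),
    ('1', ['.', ',', '?', '!', ':', ';']),
    ('2', ['а', 'б', 'в', 'г']), ('3', ['д', 'е', 'ж', 'з']),
    ('4', ['и', 'й', 'к', 'л']), ('5', ['м', 'н', 'о', 'п']),
    ('6', ['р', 'с', 'т', 'у']), ('7', ['ф', 'х', 'ц', 'ч']),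
    ('8', ['ш', 'щ', 'ъ', 'ы']), ('9', ['ь', 'э', 'ю', 'я'])]

-- _symbol(ch, count): row[count - 1] is guarded by `count > len(row)` and _symbol is only
-- called with count ≥ 1, so getD's default is unreachable
def pvSymbol (ch : Char) (count : Nat) : Option Char :=
  match SYMBOLS.get? ch with
  | none => none
  | some row => if count > row.length then none else some (row.getD (count - 1) ' ')

-- the for-loop over the characters with state (run_char, run_len, out); run_char is
-- None exactly while run_len = 0, so `.getD` is its unreachable read
def pvLoopB : List Char → Option Char → Nat → List Char → Option (List Char)
  | [], run, n, out =>
    if n ≠ 0 then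
      match pvSymbol (run.getD ' ') n with
      | none => none
      | some sym => some (out ++ [sym])
    else some out
  | ch :: rest, run, n, out =>
    if PySem.Chars.isspace ch then
      if n ≠ 0 then
        match pvSymbol (run.getD ' ') n with
        | none => none
        | some sym => pvLoopB rest none 0 (out ++ [sym])
      else pvLoopB rest run n out
    else if n == 0 || some ch == run then pvLoopB rest (some ch) (n + 1) out
    else none

-- `"".join(out) if out else None`: join of 1-character strings is String.ofList
def decode_numbers_alt (numbers : String) : Option String :=
  match pvLoopB numbers.toList none 0 [] with
  | none => none
  | some out => if out = [] then none else some (String.ofList out)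

-- ===== PRECONDITION & SPEC =====
-- a token that is a run of a single repeated character, of the length A accepts
def pvRun (l : List Char) : Bool :=
  !l.isEmpty && l == List.replicate l.length (l.headD ' ') &&
  (if l.headD ' ' = '0' then l.length == 1
   else if l.headD ' ' = '1' then decide (l.length ≤ 6) else decide (l.length ≤ 4))

-- On inputs whose tokens are all valid-length runs of one repeated character but where some
-- token repeats a non-digit (e.g. "aa") alongside at least one digit code, A decodes the
-- non-digit token to nothing (an accident of mapping[length].get(first_digit, '')) and returns
-- the remaining symbols, while B returns none — the intended rejection of garbage input.
def D_decode_numbers (numbers : String) : Prop :=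
  (∀ t ∈ PySem.Str.split₀ numbers, pvRun t.toList = true) ∧
  (∃ t ∈ PySem.Str.split₀ numbers, PySem.Chars.isdigit (t.toList.headD ' ') = false) ∧
  (∃ t ∈ PySem.Str.split₀ numbers, PySem.Chars.isdigit (t.toList.headD ' ') = true)

instance (numbers : String) : Decidable (D_decode_numbers numbers) := by
  unfold D_decode_numbers; infer_instance

def Spec_decode_numbers (numbers : String) (out : Option String) : Prop :=
  ¬ D_decode_numbers numbers → out = decode_numbers_alt numbers
instance (numbers : String) (out : Option String) : Decidable (Spec_decode_numbers numbers out) := by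
  unfold Spec_decode_numbers; infer_instance

def pvDiffWitness_decode_numbers : String := "2 aa"
def pvDiffWitnessOut_decode_numbers : (Option String) × (Option String) := (some "а", none)

-- ===== CLAIM (what is proved, stated in full; the proofs are below) =====
def Claim_unchanged_decode_numbers : Prop := ∀ (numbers : String), Dom_decode_numbers numbers → Spec_decode_numbers numbers (decode_numbers numbers)
def Claim_changed_decode_numbers : Prop := Dom_decode_numbers (pvDiffWitness_decode_numbers) ∧ D_decode_numbers (pvDiffWitness_decode_numbers) ∧ decode_numbers (pvDiffWitness_decode_numbers) = pvDiffWitnessOut_decode_numbers.1 ∧ decode_numbers_alt (pvDiffWitness_decode_numbers) = pvDiffWitnessOut_decode_numbers.2 ∧ pvDiffWitnessOut_decode_numbers.1 ≠ pvDiffWitnessOut_decode_numbers.2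
def Claim_exact_decode_numbers : Prop := ∀ (numbers : String), Dom_decode_numbers numbers → D_decode_numbers numbers → decode_numbers numbers ≠ decode_numbers_alt numbers

-- ===== LEMMAS AND PROOFS =====

-- proof-side per-token reading of B's state machine
def tokB (t : List Char) : Option Char :=
  match t with
  | [] => none
  | c :: _ => if t.all (fun d => d == c) then pvSymbol c t.length else none

def procToks : List (List Char) → List Char → Option (List Char)
  | [], out => some out
  | t :: ts, out =>
    match tokB t with
    | none => none
    | some sym => procToks ts (out ++ [sym])

-- Bool mirror of pvRun used by the proofs
def pvTokRun (l : List Char) : Bool :=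
  match l with
  | [] => false
  | c :: _ => l.all (fun d => d == c) &&
      (if c = '0' then l.length == 1 else if c = '1' then decide (l.length ≤ 6) else decide (l.length ≤ 4))

theorem pvRunIff (l : List Char) : pvRun l = true ↔ pvTokRun l = true := by
  cases l with
  | nil => simp [pvRun, pvTokRun]
  | cons c cs =>
    simp only [pvRun, pvTokRun, List.isEmpty_cons, Bool.not_false, Bool.true_and,
      List.headD_cons, Bool.and_eq_true, beq_iff_eq, List.all_eq_true, List.eq_replicate_iff,
      true_and]
    tauto

theorem pvCharEqIffToNat (c d : Char) : c = d ↔ c.toNat = d.toNat :=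
  ⟨fun h => h ▸ rfl, fun h => Char.ext (UInt32.toNat_inj.mp h)⟩

theorem pvDigitCases (c : Char) (h : PySem.Chars.isdigit c = true) :
    c = '0' ∨ c = '1' ∨ c = '2' ∨ c = '3' ∨ c = '4' ∨ c = '5' ∨ c = '6' ∨ c = '7' ∨ c = '8' ∨ c = '9' := by
  simp only [PySem.Chars.isdigit, Bool.and_eq_true, decide_eq_true_eq] at h
  obtain ⟨h1, h2⟩ := h
  have hl : 48 ≤ c.toNat := h1
  have hr : c.toNat ≤ 57 := h2
  simp only [pvCharEqIffToNat, show ('0':Char).toNat = 48 from rfl, show ('1':Char).toNat = 49 from rfl,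
    show ('2':Char).toNat = 50 from rfl, show ('3':Char).toNat = 51 from rfl, show ('4':Char).toNat = 52 from rfl,
    show ('5':Char).toNat = 53 from rfl, show ('6':Char).toNat = 54 from rfl, show ('7':Char).toNat = 55 from rfl,
    show ('8':Char).toNat = 56 from rfl, show ('9':Char).toNat = 57 from rfl]
  omega

-- tokens of split() are nonempty
theorem pvSplitGoNonempty (s cur : List Char) (acc : List (List Char))
    (hacc : ∀ t ∈ acc, t ≠ []) : ∀ t ∈ PySem.Chars.split₀.go s cur acc, t ≠ [] := by
  induction s generalizing cur acc with
  | nil =>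
    intro t ht
    rw [PySem.Chars.split₀.go] at ht
    split at ht
    · exact hacc t (List.mem_reverse.mp ht)
    · rcases List.mem_cons.mp (List.mem_reverse.mp ht) with rfl | h
      · rename_i hcur; simp_all
      · exact hacc t h
  | cons c rest ih =>
    intro t ht
    rw [PySem.Chars.split₀.go] at ht
    split at ht
    · split at ht
      · exact ih [] acc hacc t ht
      · refine ih [] _ ?_ t ht
        intro u hu
        rcases List.mem_cons.mp hu with rfl | h
        · rename_i hcur; simp_all
        · exact hacc u h
    · exact ih (c :: cur) acc hacc t ht

theorem pvSplitEq (numbers : String) :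
    PySem.Str.split₀ numbers = (PySem.Chars.split₀.go numbers.toList [] []).map String.ofList := by
  rw [PySem.Str.split₀.eq_1]
  rfl

theorem pvSplitNonempty (s : String) : ∀ t ∈ PySem.Str.split₀ s, t.toList ≠ [] := by
  intro t ht
  rw [PySem.Str.split₀.eq_1] at ht
  obtain ⟨l, hl, rfl⟩ := List.mem_map.mp ht
  rw [String.toList_ofList]
  exact pvSplitGoNonempty s.toList [] [] (by simp) l hl

-- A's validity test is exactly pvTokRun
theorem pvIsCorrectEq (t : String) : is_correct t = pvTokRun t.toList := by
  unfold is_correct pvTokRun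
  cases h : t.toList with
  | nil =>
    have : PySem.Str.pyGet? t 0 = none := by
      simp [PySem.Str.pyGet?, PySem.Chars.pyGet?, h, PySem.List.pyGet?]
    rw [this]
  | cons c cs =>
    have hg : PySem.Str.pyGet? t 0 = some c := by
      simp [PySem.Str.pyGet?, PySem.Chars.pyGet?, h, PySem.List.pyGet?, PySem.List.pyIdx?]
    rw [hg]
    have hlen : PySem.Str.len t = ((c :: cs).length : Int) := by
      simp [PySem.Str.len_eq, h]
    rw [hlen]
    by_cases h0 : c = '0'
    · subst h0
      cases cs with
      | nil => decide
      | cons d ds =>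
        simp
        omega
    · by_cases h1 : c = '1'
      · subst h1
        simp only [if_neg h0]
        rw [Bool.and_comm]
        simp
      · simp only [if_neg h0, if_neg h1]
        rw [Bool.and_comm]
        congr 1
        simp

theorem pvRunShape (t : String) (c : Char) (cs : List Char) (h : t.toList = c :: cs)
    (hv : pvTokRun t.toList = true) :
    t.toList = List.replicate t.toList.length c ∧ 1 ≤ t.toList.length := by
  rw [h] at hv ⊢
  unfold pvTokRun at hv
  simp only [Bool.and_eq_true, List.all_eq_true, beq_iff_eq] at hv
  constructor
  · exact List.eq_replicate_of_mem (fun b hb => hv.1 b hb)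
  · simp

-- valid digit-headed token: B's per-token machine produces exactly A's (nonempty) symbol
set_option maxRecDepth 16384 in
theorem pvTokDigitVal (t : String) (hne : t.toList ≠ []) (hv : pvTokRun t.toList = true)
    (hd : PySem.Chars.isdigit (t.toList.headD ' ') = true) :
    (tokB t.toList).map (fun c => String.ofList [c]) = some (pvLookupA t) ∧ pvLookupA t ≠ "" := by
  cases h : t.toList with
  | nil => exact absurd h hne
  | cons c cs =>
    rw [h] at hd
    have hd' : PySem.Chars.isdigit c = true := by simpa using hd
    obtain ⟨hrep, -⟩ := pvRunShape t c cs h hv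
    set n := cs.length with hn
    have hcs : cs = List.replicate n c := by
      rw [h] at hrep
      simpa [List.replicate_succ] using hrep
    have ht : t = String.ofList (c :: List.replicate n c) := by
      have h0 : t = String.ofList t.toList := String.ofList_toList.symm
      rw [h, hcs] at h0
      simpa using h0
    rw [h, hcs] at hv; unfold pvTokRun at hv
    rw [hcs]
    rcases pvDigitCases c hd' with rfl|rfl|rfl|rfl|rfl|rfl|rfl|rfl|rfl|rfl
    · have hb : n ≤ 0 := by simp at hv; omega
      interval_cases n
      rw [ht]; decide
    · have hb : n ≤ 5 := by simp at hv; omega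
      interval_cases n <;> (rw [ht]; decide)
    · have hb : n ≤ 3 := by simp at hv; omega
      interval_cases n <;> (rw [ht]; decide)
    · have hb : n ≤ 3 := by simp at hv; omega
      interval_cases n <;> (rw [ht]; decide)
    · have hb : n ≤ 3 := by simp at hv; omega
      interval_cases n <;> (rw [ht]; decide)
    · have hb : n ≤ 3 := by simp at hv; omega
      interval_cases n <;> (rw [ht]; decide)
    · have hb : n ≤ 3 := by simp at hv; omega
      interval_cases n <;> (rw [ht]; decide)
    · have hb : n ≤ 3 := by simp at hv; omega
      interval_cases n <;> (rw [ht]; decide)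
    · have hb : n ≤ 3 := by simp at hv; omega
      interval_cases n <;> (rw [ht]; decide)
    · have hb : n ≤ 3 := by simp at hv; omega
      interval_cases n <;> (rw [ht]; decide)

-- any inner lookup of pyMapping with a non-digit first character falls back to ''
theorem pvInnerLookupNone (c : Char) (hc : PySem.Chars.isdigit c = false) (L : Int) :
    ((pyMapping.get? L).getD PySem.Dict.empty).getD (String.ofList [c]) "" = "" := by
  cases hL : pyMapping.get? L with
  | none =>
    simp only [Option.getD_none]
    apply PySem.Dict.getD_of_get?_eq_none
    rw [PySem.Dict.get?_eq_none_iff_not_mem_keys]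
    simp [PySem.Dict.keys_empty]
  | some D =>
    simp only [Option.getD_some]
    have hDv : D ∈ pyMapping.values := by
      have hit := (PySem.Dict.get?_eq_some_iff_mem_items pyMapping L D (by decide)).mp hL
      simp only [PySem.Dict.values]
      exact List.mem_map_of_mem hit
    have hall : ∀ D' ∈ pyMapping.values, ∀ k ∈ PySem.Dict.keys D',
        k.toList.length = 1 ∧ PySem.Chars.isdigit (k.toList.headD ' ') = true := by decide
    apply PySem.Dict.getD_of_get?_eq_none
    rw [PySem.Dict.get?_eq_none_iff_not_mem_keys]
    intro hm
    obtain ⟨h1, h2⟩ := hall D hDv _ hm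
    rw [String.toList_ofList] at h1 h2
    simp at h2
    rw [h2] at hc
    simp at hc

-- non-digit characters have no SYMBOLS row
set_option maxRecDepth 65536 in
theorem pvSymbolsNonDigit (c : Char) (hc : PySem.Chars.isdigit c = false) :
    SYMBOLS.get? c = none := by
  rw [PySem.Dict.get?_eq_none_iff_not_mem_keys]
  intro hm
  have hkeys : SYMBOLS.keys = ['0', '1', '2', '3', '4', '5', '6', '7', '8', '9'] := by decide
  rw [hkeys] at hm
  fin_cases hm <;> exact absurd hc (by decide)

-- valid non-digit token: A contributes "", B's machine rejects
theorem pvTokNonDigitVal (t : String) (hne : t.toList ≠ [])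
    (hd : PySem.Chars.isdigit (t.toList.headD ' ') = false) :
    tokB t.toList = none ∧ pvLookupA t = "" := by
  cases h : t.toList with
  | nil => exact absurd h hne
  | cons c cs =>
    rw [h] at hd
    have hd' : PySem.Chars.isdigit c = false := by simpa using hd
    constructor
    · simp only [tokB]
      by_cases huni : (c :: cs).all (fun d => d == c) = true
      · rw [if_pos huni]
        simp [pvSymbol, pvSymbolsNonDigit c hd']
      · rw [if_neg huni]
    · have hg : PySem.Str.pyGet? t 0 = some c := by
        simp [PySem.Str.pyGet?, PySem.Chars.pyGet?, h, PySem.List.pyGet?, PySem.List.pyIdx?]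
      unfold pvLookupA
      rw [hg]
      exact pvInnerLookupNone c hd' _

-- an invalid token is rejected by B's machine
set_option maxRecDepth 8192 in
theorem pvTokBNoneOfNotRun (t : List Char) (hv : pvTokRun t = false) : tokB t = none := by
  cases t with
  | nil => rfl
  | cons c cs =>
    by_cases huni : (c :: cs).all (fun d => d == c) = true
    · have hbound : (if c = '0' then (c :: cs).length == 1
          else if c = '1' then decide ((c :: cs).length ≤ 6)
          else decide ((c :: cs).length ≤ 4)) = false := by
        have hv' : (((c :: cs).all fun d => d == c) &&
            (if c = '0' then (c :: cs).length == 1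
             else if c = '1' then decide ((c :: cs).length ≤ 6)
             else decide ((c :: cs).length ≤ 4))) = false := hv
        rwa [huni, Bool.true_and] at hv'
      simp only [tokB, if_pos huni]
      by_cases hc0 : c = '0'
      · subst hc0
        rw [if_pos rfl] at hbound
        simp only [pvSymbol, show SYMBOLS.get? '0' = some [' '] from rfl]
        have hgt : [' '].length < ('0' :: cs).length := by
          simp only [List.length_cons, List.length_nil]
          simp only [beq_eq_false_iff_ne, ne_eq, List.length_cons] at hbound
          omega
        rw [if_pos hgt]
      · by_cases hc1 : c = '1'
        · subst hc1
          rw [if_neg hc0, if_pos rfl] at hbound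
          simp only [pvSymbol, show SYMBOLS.get? '1' = some ['.', ',', '?', '!', ':', ';'] from rfl]
          have hgt : ['.', ',', '?', '!', ':', ';'].length < ('1' :: cs).length := by
            simp only [List.length_cons, List.length_nil]
            simp only [decide_eq_false_iff_not, List.length_cons] at hbound
            omega
          rw [if_pos hgt]
        · rw [if_neg hc0, if_neg hc1] at hbound
          simp only [pvSymbol]
          cases hrow : SYMBOLS.get? c with
          | none => rfl
          | some row =>
            have hit := (PySem.Dict.get?_eq_some_iff_mem_items SYMBOLS c row (by decide)).mp hrow
            have hall : ∀ p ∈ PySem.Dict.items SYMBOLS, p.1 = '1' ∨ p.2.length ≤ 4 := by decide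
            have hlenrow : row.length ≤ 4 := by
              rcases hall _ hit with h | h
              · exact absurd h hc1
              · exact h
            have hgt : row.length < (c :: cs).length := by
              simp only [List.length_cons]
              simp only [decide_eq_false_iff_not, List.length_cons] at hbound
              omega
            show (if (c :: cs).length > row.length then none
                  else some (row.getD ((c :: cs).length - 1) ' ')) = none
            rw [if_pos hgt]
    · simp [tokB, huni]

theorem pvLoopASome (ts : List String) (acc : List String)
    (h : ∀ t ∈ ts, is_correct t = true) :
    pvLoopA ts acc = some (acc ++ ts.map pvLookupA) := by
  induction ts generalizing acc with
  | nil => simp [pvLoopA]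
  | cons x xs ih =>
    simp only [pvLoopA, h x (List.mem_cons_self), if_true]
    rw [ih _ (fun t ht => h t (List.mem_cons_of_mem _ ht))]
    simp

theorem pvLoopANone (ts : List String) (acc : List String)
    (h : ∃ t ∈ ts, is_correct t = false) :
    pvLoopA ts acc = none := by
  induction ts generalizing acc with
  | nil => simp at h
  | cons x xs ih =>
    obtain ⟨t, ht, hf⟩ := h
    rcases List.mem_cons.mp ht with rfl | hmem
    · simp [pvLoopA, hf]
    · by_cases hx : is_correct x = true
      · simp only [pvLoopA, hx, if_true]
        exact ih _ ⟨t, hmem, hf⟩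
      · simp [pvLoopA, hx]

theorem pvMapMTokSome (ts : List (List Char))
    (h : ∀ t ∈ ts, (tokB t).map (fun c => String.ofList [c]) = some (pvLookupA (String.ofList t))) :
    ∃ syms, ts.mapM tokB = some syms ∧
      syms.map (fun c => String.ofList [c]) = ts.map (fun t => pvLookupA (String.ofList t)) := by
  induction ts with
  | nil => exact ⟨[], rfl, rfl⟩
  | cons t rest ih =>
    obtain ⟨syms, h1, h2⟩ := ih (fun u hu => h u (List.mem_cons_of_mem _ hu))
    have ht := h t (List.mem_cons_self)
    cases htk : tokB t with
    | none => rw [htk] at ht; exact absurd ht (by simp)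
    | some sym =>
      rw [htk] at ht
      refine ⟨sym :: syms, ?_, ?_⟩
      · rw [List.mapM_cons, htk, h1]; rfl
      · simp only [List.map_cons, h2]
        congr 1
        simpa using ht

theorem pvMapMTokNone (ts : List (List Char)) (h : ∃ t ∈ ts, tokB t = none) :
    ts.mapM tokB = none := by
  induction ts with
  | nil => simp at h
  | cons x xs ih =>
    obtain ⟨t, ht, hf⟩ := h
    rcases List.mem_cons.mp ht with rfl | hmem
    · rw [List.mapM_cons, hf]; rfl
    · rw [List.mapM_cons]
      cases tokB x with
      | none => rfl
      | some v => rw [ih ⟨t, hmem, hf⟩]; rfl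

theorem pvCharsJoinNilFlatten (parts : List (List Char)) :
    PySem.Chars.join [] parts = parts.flatten := by
  induction parts with
  | nil => simp [PySem.Chars.join_nil]
  | cons p rest ih =>
    cases rest with
    | nil => simp [PySem.Chars.join_singleton]
    | cons q r => rw [PySem.Chars.join_cons_cons]; simp_all

theorem pvJoinToList (parts : List String) :
    (PySem.Str.join "" parts).toList = (parts.map String.toList).flatten := by
  rw [PySem.Str.toList_join, show ("" : String).toList = [] from rfl, pvCharsJoinNilFlatten]

theorem pvJoinSingletons (syms : List Char) :
    PySem.Str.join "" (syms.map (fun c => String.ofList [c])) = String.ofList syms := by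
  apply String.toList_inj.mp
  rw [pvJoinToList, String.toList_ofList]
  induction syms with
  | nil => simp
  | cons c cs ih => simpa using ih

-- === bridge: B's run-length scan equals per-token processing of split₀'s tokens ===

theorem pvGoAcc (s cur : List Char) (acc : List (List Char)) :
    PySem.Chars.split₀.go s cur acc = acc.reverse ++ PySem.Chars.split₀.go s cur [] := by
  induction s generalizing cur acc with
  | nil =>
    rw [PySem.Chars.split₀.go, PySem.Chars.split₀.go]
    split <;> simp
  | cons c rest ih =>
    rw [PySem.Chars.split₀.go]
    conv_rhs => rw [PySem.Chars.split₀.go]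
    split
    · split
      · exact ih [] acc
      · rw [ih [] (cur.reverse :: acc), ih [] [cur.reverse]]
        simp
    · exact ih (c :: cur) acc

theorem pvGoPrefix (s : List Char) : ∀ (cur : List Char), cur ≠ [] →
    ∃ d ts, PySem.Chars.split₀.go s cur [] = (cur.reverse ++ d) :: ts := by
  induction s with
  | nil =>
    intro cur h
    rw [PySem.Chars.split₀.go]
    rw [if_neg (by simpa [List.isEmpty_iff] using h)]
    exact ⟨[], [], by simp⟩
  | cons c rest ih =>
    intro cur h
    rw [PySem.Chars.split₀.go]
    split
    · refine ⟨[], PySem.Chars.split₀.go rest [] [], ?_⟩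
      rw [if_neg (by simpa [List.isEmpty_iff] using h), pvGoAcc]
      simp
    · obtain ⟨d, ts, hd⟩ := ih (c :: cur) (by simp)
      refine ⟨c :: d, ts, ?_⟩
      rw [hd]
      simp

theorem pvTokBReplicate (c : Char) (n : Nat) (hn : 0 < n) :
    tokB (List.replicate n c) = pvSymbol c n := by
  cases n with
  | zero => omega
  | succ m =>
    simp only [tokB, List.replicate_succ]
    rw [if_pos (by simp)]
    simp

theorem pvTokBNonUniform (t : List Char) (c x : Char) (hx : x ∈ t) (hne : x ≠ c)
    (hhead : t.headD ' ' = c) : tokB t = none := by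
  cases t with
  | nil => rfl
  | cons h rest =>
    simp only [List.headD_cons] at hhead
    subst hhead
    simp only [tokB]
    rw [if_neg]
    intro hall
    exact hne (by simpa using (List.all_eq_true.mp hall) x hx)

theorem pvLoopB_go (s : List Char) : ∀ (cur : List Char) (run : Option Char) (n : Nat) (out : List Char),
    ((run = none ∧ n = 0 ∧ cur = []) ∨ (∃ c, run = some c ∧ 0 < n ∧ cur = List.replicate n c)) →
    pvLoopB s run n out = procToks (PySem.Chars.split₀.go s cur []) out := by
  induction s with
  | nil =>
    intro cur run n out hinv
    rw [PySem.Chars.split₀.go]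
    rcases hinv with ⟨rfl, rfl, rfl⟩ | ⟨c, rfl, hn, rfl⟩
    · simp [pvLoopB, procToks]
    · rw [if_neg (by simp [List.isEmpty_iff]; omega)]
      have h1 : pvLoopB ([] : List Char) (some c) n out =
          (match pvSymbol c n with
           | none => none
           | some sym => some (out ++ [sym])) := by
        simp only [pvLoopB, Option.getD_some]
        rw [if_pos (show n ≠ 0 by omega)]
      have h2 : procToks [List.replicate n c] out =
          (match pvSymbol c n with
           | none => none
           | some sym => some (out ++ [sym])) := by
        show (match tokB (List.replicate n c) with
              | none => none
              | some sym => procToks [] (out ++ [sym])) = _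
        rw [pvTokBReplicate c n hn]
        cases pvSymbol c n with
        | none => rfl
        | some sym => rfl
      simp only [List.reverse_nil, List.reverse_cons, List.nil_append, List.reverse_replicate]
      rw [h1, h2]
  | cons ch rest ih =>
    intro cur run n out hinv
    rw [PySem.Chars.split₀.go]
    by_cases hsp : PySem.Chars.isspace ch = true
    · rw [if_pos hsp]
      rcases hinv with ⟨rfl, rfl, rfl⟩ | ⟨c, rfl, hn, rfl⟩
      · rw [if_pos (by simp)]
        simp only [pvLoopB, hsp, if_pos, if_neg (by omega : ¬ (0 : Nat) ≠ 0)]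
        exact ih [] none 0 out (Or.inl ⟨rfl, rfl, rfl⟩)
      · rw [if_neg (by simp [List.isEmpty_iff]; omega)]
        rw [pvGoAcc rest [] [(List.replicate n c).reverse]]
        simp only [List.reverse_cons, List.reverse_nil, List.nil_append, List.reverse_replicate]
        simp only [pvLoopB, hsp, if_pos, if_pos (by omega : n ≠ 0), Option.getD_some]
        simp only [List.singleton_append, procToks, pvTokBReplicate c n hn]
        cases pvSymbol c n with
        | none => rfl
        | some sym => exact ih [] none 0 (out ++ [sym]) (Or.inl ⟨rfl, rfl, rfl⟩)
    · rw [if_neg hsp]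
      rcases hinv with ⟨rfl, rfl, rfl⟩ | ⟨c, rfl, hn, hcur⟩
      · simp only [pvLoopB, hsp, Bool.false_eq_true, if_false]
        rw [if_pos (by simp)]
        exact ih [ch] (some ch) 1 out (Or.inr ⟨ch, rfl, by omega, by simp⟩)
      · by_cases hc : c = ch
        · simp only [pvLoopB, hsp, Bool.false_eq_true, if_false]
          rw [if_pos (by simp [hc])]
          subst hcur
          rw [hc]
          exact ih (ch :: List.replicate n ch) (some ch) (n + 1) out
            (Or.inr ⟨ch, rfl, by omega, by simp [List.replicate_succ]⟩)
        · simp only [pvLoopB, hsp, Bool.false_eq_true, if_false]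
          rw [if_neg (by
            simp only [Bool.or_eq_true, beq_iff_eq, Option.some.injEq, not_or]
            exact ⟨by omega, fun h => hc h.symm⟩)]
          obtain ⟨d, ts, hd⟩ := pvGoPrefix rest (ch :: cur) (by simp)
          rw [hd]
          subst hcur
          simp only [procToks]
          have hhead : ((ch :: List.replicate n c).reverse ++ d).headD ' ' = c := by
            cases n with
            | zero => exact (Nat.lt_irrefl 0 hn).elim
            | succ m =>
              rw [List.reverse_cons, List.reverse_replicate, List.replicate_succ]
              simp [List.cons_append]
          rw [pvTokBNonUniform ((ch :: List.replicate n c).reverse ++ d) c ch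
            (by simp) (fun h => hc h.symm) hhead]

theorem pvProcToksMapM (ts : List (List Char)) : ∀ (out : List Char),
    procToks ts out = (ts.mapM tokB).map (fun syms => out ++ syms) := by
  induction ts with
  | nil => intro out; simp [procToks]
  | cons t rest ih =>
    intro out
    simp only [procToks, List.mapM_cons]
    cases tokB t with
    | none => rfl
    | some sym =>
      show procToks rest (out ++ [sym]) = _
      rw [ih (out ++ [sym])]
      cases rest.mapM tokB with
      | none => rfl
      | some syms => simp

-- B as the per-token pipeline over split₀'s raw tokens
theorem pvAltToks (numbers : String) :
    decode_numbers_alt numbers =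
      (match (PySem.Chars.split₀.go numbers.toList [] []).mapM tokB with
       | none => none
       | some syms => if syms = [] then none else some (String.ofList syms)) := by
  unfold decode_numbers_alt
  rw [pvLoopB_go numbers.toList [] none 0 [] (Or.inl ⟨rfl, rfl, rfl⟩), pvProcToksMapM]
  cases (PySem.Chars.split₀.go numbers.toList [] []).mapM tokB with
  | none => rfl
  | some syms => simp

theorem decode_numbers_spec' (numbers : String) (hnD : ¬ D_decode_numbers numbers) :
    decode_numbers numbers = decode_numbers_alt numbers := by
  rw [pvAltToks]
  have hts : PySem.Str.split₀ numbers =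
      (PySem.Chars.split₀.go numbers.toList [] []).map String.ofList := pvSplitEq numbers
  have hrawne : ∀ t ∈ PySem.Chars.split₀.go numbers.toList [] [], t ≠ [] :=
    pvSplitGoNonempty numbers.toList [] [] (by simp)
  unfold decode_numbers
  by_cases hall : ∀ t ∈ PySem.Str.split₀ numbers, pvRun t.toList = true
  · by_cases hdig : ∀ t ∈ PySem.Str.split₀ numbers, PySem.Chars.isdigit (t.toList.headD ' ') = true
    · -- every token is a valid digit code
      have hstep : ∀ t ∈ PySem.Str.split₀ numbers,
          (tokB t.toList).map (fun c => String.ofList [c]) = some (pvLookupA t) ∧ pvLookupA t ≠ "" :=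
        fun t ht => pvTokDigitVal t (pvSplitNonempty numbers t ht) ((pvRunIff t.toList).mp (hall t ht)) (hdig t ht)
      obtain ⟨syms, h1, h2⟩ := pvMapMTokSome (PySem.Chars.split₀.go numbers.toList [] [])
        (by
          intro t ht
          have hmem : String.ofList t ∈ PySem.Str.split₀ numbers := by
            rw [hts]; exact List.mem_map_of_mem ht
          have h' := (hstep _ hmem).1
          rwa [String.toList_ofList] at h')
      rw [pvLoopASome _ _ (fun t ht => (pvIsCorrectEq t).trans ((pvRunIff t.toList).mp (hall t ht))), h1]
      simp only [List.nil_append]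
      have hmapeq : (PySem.Str.split₀ numbers).map pvLookupA = syms.map (fun c => String.ofList [c]) := by
        rw [hts, List.map_map, h2]
        rfl
      rw [hmapeq, pvJoinSingletons, String.toList_ofList]
    · -- some valid token starts with a non-digit; since ¬D_, no token is a digit code
      push Not at hdig
      obtain ⟨t0, ht0, ht0f⟩ := hdig
      have hnodig : ∀ t ∈ PySem.Str.split₀ numbers, PySem.Chars.isdigit (t.toList.headD ' ') = false := by
        intro t ht
        by_contra hcon
        exact hnD ⟨hall, ⟨t0, ht0, Bool.not_eq_true _ ▸ ht0f⟩, ⟨t, ht, Bool.not_eq_false _ ▸ hcon⟩⟩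
      have hstep : ∀ t ∈ PySem.Str.split₀ numbers, tokB t.toList = none ∧ pvLookupA t = "" :=
        fun t ht => pvTokNonDigitVal t (pvSplitNonempty numbers t ht) (hnodig t ht)
      obtain ⟨r0, hr0, rfl⟩ := List.mem_map.mp (hts ▸ ht0)
      rw [pvMapMTokNone _ ⟨r0, hr0, by
        have := (hstep _ (hts ▸ List.mem_map_of_mem hr0)).1
        rwa [String.toList_ofList] at this⟩]
      rw [pvLoopASome _ _ (fun t ht => (pvIsCorrectEq t).trans ((pvRunIff t.toList).mp (hall t ht)))]
      simp only [List.nil_append]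
      rw [if_pos]
      rw [pvJoinToList]
      apply List.flatten_eq_nil_iff.mpr
      intro l hl
      obtain ⟨s, hs, rfl⟩ := List.mem_map.mp hl
      obtain ⟨t, ht, rfl⟩ := List.mem_map.mp hs
      rw [(hstep t ht).2]
      rfl
  · -- some token is invalid: both sides reject
    push Not at hall
    obtain ⟨t, ht, htf⟩ := hall
    have htf' : pvTokRun t.toList = false := by
      cases h : pvTokRun t.toList
      · rfl
      · exact absurd ((pvRunIff t.toList).mpr h) htf
    obtain ⟨r0, hr0, rfl⟩ := List.mem_map.mp (hts ▸ ht)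
    rw [pvMapMTokNone _ ⟨r0, hr0, by
      have h2 : pvTokRun r0 = false := by rwa [String.toList_ofList] at htf'
      exact pvTokBNoneOfNotRun _ h2⟩]
    rw [pvLoopANone _ _ ⟨String.ofList r0, ht, (pvIsCorrectEq _).trans htf'⟩]

-- ===== VERDICT (by name: the statement is the Claim_ definition above) =====
theorem decode_numbers_spec : Claim_unchanged_decode_numbers := by
  intro numbers _ hnD
  exact decode_numbers_spec' numbers hnD

set_option maxRecDepth 4096 in
theorem decode_numbers_changed : Claim_changed_decode_numbers := by
  unfold Claim_changed_decode_numbers; decide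

theorem decode_numbers_tight : Claim_exact_decode_numbers := by
  intro numbers _ hD
  obtain ⟨hall, ⟨t0, ht0, ht0f⟩, ⟨t1, ht1, ht1t⟩⟩ := hD
  have hB : decode_numbers_alt numbers = none := by
    rw [pvAltToks]
    obtain ⟨r0, hr0, hr0e⟩ := List.mem_map.mp (pvSplitEq numbers ▸ ht0)
    rw [pvMapMTokNone _ ⟨r0, hr0, by
      have := (pvTokNonDigitVal t0 (pvSplitNonempty numbers t0 ht0) ht0f).1
      rw [← hr0e, String.toList_ofList] at this
      exact this⟩]
  have hA : ∃ s, decode_numbers numbers = some s := by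
    unfold decode_numbers
    rw [pvLoopASome _ _ (fun t ht => (pvIsCorrectEq t).trans ((pvRunIff t.toList).mp (hall t ht)))]
    simp only [List.nil_append]
    have hjoin : (PySem.Str.join "" ((PySem.Str.split₀ numbers).map pvLookupA)).toList ≠ [] := by
      rw [pvJoinToList]
      intro hflat
      have hmem : (pvLookupA t1).toList ∈ ((PySem.Str.split₀ numbers).map pvLookupA).map String.toList := by
        simp only [List.map_map]
        exact List.mem_map_of_mem ht1
      have := List.flatten_eq_nil_iff.mp hflat _ hmem
      exact (pvTokDigitVal t1 (pvSplitNonempty numbers t1 ht1) ((pvRunIff t1.toList).mp (hall t1 ht1)) ht1t).2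
        (String.toList_inj.mp this)
    rw [if_neg hjoin]
    exact ⟨_, rfl⟩
  obtain ⟨s, hs⟩ := hA
  rw [hs, hB]
  simp
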